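-- pv_equiv track=rewrite | github.com/memouritsen-ui/danish-procedure-generator-unified | backend/procedurewriter/agents/researcher.py | _classify_publication_type
-- ===== SOURCE A (Python) =====
-- def _classify_publication_type(pub_types: list[str]) -> str:
--     """Classify publication into evidence tier based on PubMed publication types."""
--     pub_types_lower = [pt.lower() for pt in pub_types]
--
--     if any("meta-analysis" in pt or "systematic review" in pt for pt in pub_types_lower):
--         return "systematic_review"
--     elif any("guideline" in pt or "practice guideline" in pt for pt in pub_types_lower):
--         return "practice_guideline"
--     elif any("randomized controlled" in pt or "clinical trial" in pt for pt in pub_types_lower):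
--         return "rct"
--     elif any("cohort" in pt or "observational" in pt or "case-control" in pt for pt in pub_types_lower):
--         return "observational"
--     elif any("case report" in pt for pt in pub_types_lower):
--         return "case_report"
--     else:
--         return "unclassified"
-- ===== SOURCE B (Python) =====
-- _TIERS = [
--     ("systematic_review", ["meta-analysis", "systematic review"]),
--     ("practice_guideline", ["guideline", "practice guideline"]),
--     ("rct", ["randomized controlled", "clinical trial"]),
--     ("observational", ["cohort", "observational", "case-control"]),
--     ("case_report", ["case report"]),
-- ]
--
--
-- def _rank(pt: str) -> int:
--     """Smallest tier index whose keyword list matches the lowercased string, else len(_TIERS)."""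
--     low = pt.lower()
--     for i, (_, keywords) in enumerate(_TIERS):
--         if any(k in low for k in keywords):
--             return i
--     return len(_TIERS)
--
--
-- def _classify_publication_type(pub_types: list[str]) -> str:
--     """Classify publication into evidence tier based on PubMed publication types."""
--     best = len(_TIERS)
--     for pt in pub_types:
--         best = min(best, _rank(pt))
--     return _TIERS[best][0] if best < len(_TIERS) else "unclassified"
-- ===== Notes on version B (the rewrite author's own statement) =====
-- stated objective: alternative
-- what changed: Replaced the five sequential per-tier any()-scans over the whole list with a single pass over the publications that computes each item's best tier rank from an ordered tier table and keeps the running minimum.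
import Mathlib
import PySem

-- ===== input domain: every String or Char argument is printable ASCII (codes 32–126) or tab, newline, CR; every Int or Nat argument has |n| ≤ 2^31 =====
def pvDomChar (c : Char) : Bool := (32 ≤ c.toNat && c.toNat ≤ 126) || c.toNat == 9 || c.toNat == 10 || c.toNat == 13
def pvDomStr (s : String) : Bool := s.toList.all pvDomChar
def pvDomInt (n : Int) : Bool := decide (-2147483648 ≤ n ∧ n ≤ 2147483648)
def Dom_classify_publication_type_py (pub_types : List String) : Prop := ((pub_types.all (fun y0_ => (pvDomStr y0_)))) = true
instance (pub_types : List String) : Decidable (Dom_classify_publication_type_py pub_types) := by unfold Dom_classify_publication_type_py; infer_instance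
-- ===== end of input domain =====

-- B replaces A's five sequential per-tier any()-scans by one pass over the publications that keeps the minimum tier rank from an ordered tier table (objective: alternative decomposition, same cost class).


-- ===== PORT A =====
def classify_publication_type_py (pub_types : List String) : String :=
  let pub_types_lower := pub_types.map PySem.Str.lower
  if pub_types_lower.any (fun pt => PySem.Str.isIn "meta-analysis" pt || PySem.Str.isIn "systematic review" pt) then
    "systematic_review"
  else if pub_types_lower.any (fun pt => PySem.Str.isIn "guideline" pt || PySem.Str.isIn "practice guideline" pt) then
    "practice_guideline"
  else if pub_types_lower.any (fun pt => PySem.Str.isIn "randomized controlled" pt || PySem.Str.isIn "clinical trial" pt) then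
    "rct"
  else if pub_types_lower.any (fun pt => PySem.Str.isIn "cohort" pt || PySem.Str.isIn "observational" pt || PySem.Str.isIn "case-control" pt) then
    "observational"
  else if pub_types_lower.any (fun pt => PySem.Str.isIn "case report" pt) then
    "case_report"
  else
    "unclassified"

-- ===== PORT B =====
-- ordered tier table, highest evidence first (Source B's _TIERS)
def pvTiers : List (String × List String) :=
  [("systematic_review", ["meta-analysis", "systematic review"]),
   ("practice_guideline", ["guideline", "practice guideline"]),
   ("rct", ["randomized controlled", "clinical trial"]),
   ("observational", ["cohort", "observational", "case-control"]),
   ("case_report", ["case report"])]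

-- Source B's _rank loop: first tier index whose keywords match, else the table length
def pvRankGo (low : String) : List (String × List String) → Nat → Nat
  | [], i => i
  | (_, kws) :: rest, i =>
      if kws.any (fun k => PySem.Str.isIn k low) then i else pvRankGo low rest (i + 1)

def pvRank (pt : String) : Nat := pvRankGo (PySem.Str.lower pt) pvTiers 0

def classify_publication_type_py_alt (pub_types : List String) : String :=
  let best := pub_types.foldl (fun b pt => min b (pvRank pt)) pvTiers.length
  if h : best < pvTiers.length then (pvTiers[best]).1 else "unclassified"

-- ===== PRECONDITION & SPEC =====
def Spec_classify_publication_type_py (pub_types : List String) (out : String) : Prop := out = classify_publication_type_py_alt pub_types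
instance (pub_types : List String) (out : String) : Decidable (Spec_classify_publication_type_py pub_types out) := by unfold Spec_classify_publication_type_py; infer_instance

-- ===== CLAIM (what is proved, stated in full; the proofs are below) =====
def Claim_equal_classify_publication_type_py : Prop := ∀ (pub_types : List String), Dom_classify_publication_type_py pub_types → Spec_classify_publication_type_py pub_types (classify_publication_type_py pub_types)

-- ===== LEMMAS AND PROOFS =====

-- the per-string tier predicates, on the lowercased string
def pvQ0 (pt : String) : Bool := PySem.Str.isIn "meta-analysis" (PySem.Str.lower pt) || PySem.Str.isIn "systematic review" (PySem.Str.lower pt)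
def pvQ1 (pt : String) : Bool := PySem.Str.isIn "guideline" (PySem.Str.lower pt) || PySem.Str.isIn "practice guideline" (PySem.Str.lower pt)
def pvQ2 (pt : String) : Bool := PySem.Str.isIn "randomized controlled" (PySem.Str.lower pt) || PySem.Str.isIn "clinical trial" (PySem.Str.lower pt)
def pvQ3 (pt : String) : Bool := PySem.Str.isIn "cohort" (PySem.Str.lower pt) || PySem.Str.isIn "observational" (PySem.Str.lower pt) || PySem.Str.isIn "case-control" (PySem.Str.lower pt)
def pvQ4 (pt : String) : Bool := PySem.Str.isIn "case report" (PySem.Str.lower pt)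

theorem pvRank_eq (pt : String) :
    pvRank pt = if pvQ0 pt then 0 else if pvQ1 pt then 1 else if pvQ2 pt then 2
      else if pvQ3 pt then 3 else if pvQ4 pt then 4 else 5 := by
  simp [pvRank, pvRankGo, pvTiers, pvQ0, pvQ1, pvQ2, pvQ3, pvQ4, List.any, Bool.or_assoc]

-- A's cascade, with its any-scans phrased through the tier predicates
def pvCascade (l : List String) : String :=
  if l.any pvQ0 then "systematic_review" else if l.any pvQ1 then "practice_guideline"
    else if l.any pvQ2 then "rct" else if l.any pvQ3 then "observational"
    else if l.any pvQ4 then "case_report" else "unclassified"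

theorem pvA_eq_cascade (l : List String) : classify_publication_type_py l = pvCascade l := by
  simp only [classify_publication_type_py, pvCascade, List.any_map]
  rfl

-- the minimum rank as A sees it: the first tier some publication matches
def pvIdx (l : List String) : Nat :=
  if l.any pvQ0 then 0 else if l.any pvQ1 then 1 else if l.any pvQ2 then 2
    else if l.any pvQ3 then 3 else if l.any pvQ4 then 4 else 5

theorem pvRank_le (pt : String) : pvRank pt ≤ 5 := by
  rw [pvRank_eq]; split_ifs <;> omega

theorem pv_foldl_min (l : List String) (a : Nat) (ha : a ≤ 5) :
    l.foldl (fun b pt => min b (pvRank pt)) a = min a (l.foldl (fun b pt => min b (pvRank pt)) 5) := by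
  induction l generalizing a with
  | nil => simp [List.foldl]; omega
  | cons x xs ih =>
      simp only [List.foldl]
      rw [ih (min a (pvRank x)) (by omega), ih (min 5 (pvRank x)) (by omega)]
      omega

theorem pv_fold_eq_idx (l : List String) :
    l.foldl (fun b pt => min b (pvRank pt)) 5 = pvIdx l := by
  induction l with
  | nil => simp [pvIdx]
  | cons x xs ih =>
      simp only [List.foldl]
      rw [pv_foldl_min _ _ (by omega), ih]
      rw [Nat.min_eq_right (pvRank_le x), pvRank_eq]
      simp only [pvIdx, List.any_cons]
      by_cases h0 : pvQ0 x <;> by_cases h1 : pvQ1 x <;> by_cases h2 : pvQ2 x <;>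
        by_cases h3 : pvQ3 x <;> by_cases h4 : pvQ4 x <;>
        simp [h0, h1, h2, h3, h4] <;> split_ifs <;> omega

-- ===== VERDICT (by name: the statement is the Claim_ definition above) =====
theorem classify_publication_type_py_spec : Claim_equal_classify_publication_type_py := by
  intro l _
  have hfold : l.foldl (fun b pt => min b (pvRank pt)) pvTiers.length = pvIdx l := by
    rw [show pvTiers.length = 5 from rfl, pv_foldl_min _ _ (by omega), pv_fold_eq_idx,
      Nat.min_eq_right (by unfold pvIdx; split_ifs <;> omega)]
  unfold Spec_classify_publication_type_py classify_publication_type_py_alt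
  rw [pvA_eq_cascade]
  simp only [hfold]
  by_cases h0 : l.any pvQ0 <;> by_cases h1 : l.any pvQ1 <;> by_cases h2 : l.any pvQ2 <;>
    by_cases h3 : l.any pvQ3 <;> by_cases h4 : l.any pvQ4 <;>
    simp [pvCascade, pvIdx, h0, h1, h2, h3, h4, pvTiers]
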